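-- pv_equiv track=rewrite | github.com/day-after-tomorrow/Europe-insights | fetch_intelligence 5.py | merge_feeds
-- ===== SOURCE A (Python) =====
-- BASE_FEEDS = [
--     "competitor", "jobs", "ma", "market", "regulatory",
--     "tenders", "standards", "investments", "emerging", "esg",
-- ]
--
-- MAX_PER_FEED = 8   # increased slightly to accommodate local sources
--
-- def merge_feeds(raw_feeds: dict[str, list]) -> dict[str, list]:
--     """
--     Merge numbered variants + _local variants into base feeds.
--     Deduplicates by title, sorts HIGH → MED → LOW.
--     Local items are interleaved with English items.
--     """
--     merged: dict[str, list] = {f: [] for f in BASE_FEEDS}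
--     urgency_rank = {"high": 0, "medium": 1, "low": 2}
--
--     for key, items in raw_feeds.items():
--         # "jobs2" → "jobs", "competitor_local" → "competitor"
--         base = key.rstrip("0123456789")
--         base = base.replace("_local", "")
--         if base in merged:
--             merged[base].extend(items)
--
--     for base in merged:
--         seen   = set()
--         unique = []
--         for item in merged[base]:
--             # Deduplicate by first 55 chars of display title
--             display = (item.get("titleEN") or item["title"]).lower()[:55]
--             if display not in seen:
--                 seen.add(display)
--                 unique.append(item)
--         unique.sort(key=lambda x: urgency_rank.get(x["urgency"], 2))
--         merged[base] = unique[:MAX_PER_FEED]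
--
--     return merged
-- ===== SOURCE B (Python) =====
-- BASE_FEEDS = [
--     "competitor", "jobs", "ma", "market", "regulatory",
--     "tenders", "standards", "investments", "emerging", "esg",
-- ]
--
-- MAX_PER_FEED = 8
--
-- def merge_feeds(raw_feeds):
--     """Same merge/dedup, but urgency ordering by a stable one-pass 3-bucket
--     distribution fused with the dedup loop, instead of dedup-then-sort."""
--     merged = {f: [] for f in BASE_FEEDS}
--     for key, items in raw_feeds.items():
--         base = key.rstrip("0123456789").replace("_local", "")
--         if base in merged:
--             merged[base].extend(items)
--     for base, items in merged.items():
--         seen = set()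
--         high, med, low = [], [], []
--         for item in items:
--             display = (item.get("titleEN") or item["title"]).lower()[:55]
--             if display in seen:
--                 continue
--             seen.add(display)
--             u = item.get("urgency")
--             if u == "high":
--                 high.append(item)
--             elif u == "medium":
--                 med.append(item)
--             else:
--                 low.append(item)
--         merged[base] = (high + med + low)[:MAX_PER_FEED]
--     return merged
-- ===== Notes on version B (the rewrite author's own statement) =====
-- stated objective: alternative
-- what changed: Replaces A's dedup-then-stable-sort(key=urgency_rank) with a single fused pass that deduplicates and distributes each item into one of three urgency buckets (high/medium/low), then concatenates the buckets and truncates; no comparison sort.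
import Mathlib
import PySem

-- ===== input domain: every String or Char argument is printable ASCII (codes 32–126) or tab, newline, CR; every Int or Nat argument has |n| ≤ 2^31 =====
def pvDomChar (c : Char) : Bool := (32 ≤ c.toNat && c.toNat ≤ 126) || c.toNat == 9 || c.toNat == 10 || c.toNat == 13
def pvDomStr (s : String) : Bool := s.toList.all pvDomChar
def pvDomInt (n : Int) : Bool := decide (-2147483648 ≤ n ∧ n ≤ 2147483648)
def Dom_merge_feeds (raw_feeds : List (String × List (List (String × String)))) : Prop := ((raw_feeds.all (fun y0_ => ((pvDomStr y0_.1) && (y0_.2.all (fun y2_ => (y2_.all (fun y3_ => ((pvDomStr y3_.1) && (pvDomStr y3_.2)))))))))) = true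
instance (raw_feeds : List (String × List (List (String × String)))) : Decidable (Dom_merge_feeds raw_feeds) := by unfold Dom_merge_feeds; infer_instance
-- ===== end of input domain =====

-- B replaces A's dedup-then-stable-sort by a single fused pass that distributes
-- each new item into one of three urgency buckets (high/medium/low) and
-- concatenates them; objective: alternative (no comparison sort).

-- ===== PORT A =====
-- module constants
def pvBASE_FEEDS : List String :=
  ["competitor", "jobs", "ma", "market", "regulatory",
   "tenders", "standards", "investments", "emerging", "esg"]

-- urgency_rank = {"high": 0, "medium": 1, "low": 2}
def pvURGENCY_RANK : PySem.Dict String Int :=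
  PySem.Dict.mk [("high", 0), ("medium", 1), ("low", 2)]

-- key.rstrip("0123456789") ported by hand (PySem has no chars-argument rstrip):
-- drop trailing ASCII digits — exact, Char.isDigit is '0'..'9'; then .replace("_local", "")
def pvBase (key : String) : String :=
  PySem.Str.replace (String.ofList ((key.toList.reverse.dropWhile (fun c => c.isDigit)).reverse))
    "_local" ""

-- display = (item.get("titleEN") or item["title"]).lower()[:55]
-- (where Python raises KeyError on item["title"], the port reads "";
--  Pre_merge_feeds excludes those inputs)
def pvDisplay (item : List (String × String)) : String :=
  let t : String :=
    match (PySem.Dict.mk item).get? "titleEN" with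
    | some s => if s = "" then ((PySem.Dict.mk item).get? "title").getD "" else s
    | none => ((PySem.Dict.mk item).get? "title").getD ""
  PySem.Str.slice (PySem.Str.lower t) none (some 55)

-- urgency_rank.get(x["urgency"], 2)  (KeyError on missing "urgency" → Pre_; the port reads "")
def pvRank (item : List (String × String)) : Int :=
  pvURGENCY_RANK.getD (((PySem.Dict.mk item).get? "urgency").getD "") 2

def merge_feeds (raw_feeds : List (String × List (List (String × String)))) :
    List (String × List (List (String × String))) :=
  let merged : PySem.Dict String (List (List (String × String))) :=
    pvBASE_FEEDS.foldl (fun d f => d.insert f []) PySem.Dict.empty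
  let merged :=
    raw_feeds.foldl (fun d kv =>
      let base := pvBase kv.1
      if d.contains base then d.modify base [] (fun l => l ++ kv.2) else d) merged
  let merged :=
    merged.keys.foldl (fun d base =>
      let su :=
        (d.getD base []).foldl
          (fun (su : PySem.Set String × List (List (String × String))) item =>
            let display := pvDisplay item
            if PySem.Set.contains su.1 display then su
            else (PySem.Set.add su.1 display, su.2 ++ [item]))
          (PySem.Set.empty, [])
      let unique := PySem.List.sorted su.2 pvRank false
      d.insert base (PySem.List.slice unique none (some 8))) merged
  merged.items

-- ===== PORT B =====
def merge_feeds_alt (raw_feeds : List (String × List (List (String × String)))) :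
    List (String × List (List (String × String))) :=
  let merged : PySem.Dict String (List (List (String × String))) :=
    pvBASE_FEEDS.foldl (fun d f => d.insert f []) PySem.Dict.empty
  let merged :=
    raw_feeds.foldl (fun d kv =>
      let base := pvBase kv.1
      if d.contains base then d.modify base [] (fun l => l ++ kv.2) else d) merged
  let merged :=
    merged.items.foldl (fun d bi =>
      let st :=
        bi.2.foldl
          (fun (st : PySem.Set String × List (List (String × String)) ×
                     List (List (String × String)) × List (List (String × String))) item =>
            let display := pvDisplay item
            if PySem.Set.contains st.1 display then st
            else
              let seen := PySem.Set.add st.1 display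
              let u := (PySem.Dict.mk item).get? "urgency"
              if u = some "high" then (seen, st.2.1 ++ [item], st.2.2.1, st.2.2.2)
              else if u = some "medium" then (seen, st.2.1, st.2.2.1 ++ [item], st.2.2.2)
              else (seen, st.2.1, st.2.2.1, st.2.2.2 ++ [item]))
          (PySem.Set.empty, [], [], [])
      d.insert bi.1 (PySem.List.slice (st.2.1 ++ st.2.2.1 ++ st.2.2.2) none (some 8))) merged
  merged.items

-- ===== PRECONDITION & SPEC =====
-- Pre_ excludes inputs on which Python A raises KeyError: a merged item whose
-- "titleEN" is missing/empty while "title" is missing, or an item missing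
-- "urgency".  (Slight over-exclusion: an "urgency"-less item that is a dropped
-- duplicate never reaches the sort key, so A still returns there.)
def Pre_merge_feeds (raw_feeds : List (String × List (List (String × String)))) : Prop :=
  ∀ kv ∈ raw_feeds, pvBase kv.1 ∈ pvBASE_FEEDS → ∀ item ∈ kv.2,
    (PySem.Dict.mk item).contains "urgency" = true ∧
    (((PySem.Dict.mk item).get? "titleEN").getD "" ≠ "" ∨
      (PySem.Dict.mk item).contains "title" = true)
instance (raw_feeds : List (String × List (List (String × String)))) :
    Decidable (Pre_merge_feeds raw_feeds) := by unfold Pre_merge_feeds; infer_instance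

def pvWitness_merge_feeds : (List (String × List (List (String × String)))) :=
  [("jobs2", [[("title", "New Role"), ("urgency", "low")],
              [("title", "Old Role"), ("urgency", "high")]]),
   ("weird", [[("x", "y")]])]

def Spec_merge_feeds (raw_feeds : List (String × List (List (String × String))))
    (out : List (String × List (List (String × String)))) : Prop :=
  out = merge_feeds_alt raw_feeds
instance (raw_feeds : List (String × List (List (String × String))))
    (out : List (String × List (List (String × String)))) :
    Decidable (Spec_merge_feeds raw_feeds out) := by unfold Spec_merge_feeds; infer_instance

-- ===== CLAIM (what is proved, stated in full; the proofs are below) =====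
def Claim_equal_merge_feeds : Prop :=
  ∀ (raw_feeds : List (String × List (List (String × String)))),
    Dom_merge_feeds raw_feeds → Pre_merge_feeds raw_feeds →
    Spec_merge_feeds raw_feeds (merge_feeds raw_feeds)

-- ===== LEMMAS AND PROOFS =====

-- each item's rank is 0, 1 or 2, and the rank decides B's branch tests
theorem pv_rank_cases (item : List (String × String)) :
    ((PySem.Dict.mk item).get? "urgency" = some "high" ∧ pvRank item = 0) ∨
    ((PySem.Dict.mk item).get? "urgency" ≠ some "high" ∧
      (PySem.Dict.mk item).get? "urgency" = some "medium" ∧ pvRank item = 1) ∨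
    ((PySem.Dict.mk item).get? "urgency" ≠ some "high" ∧
      (PySem.Dict.mk item).get? "urgency" ≠ some "medium" ∧ pvRank item = 2) := by
  unfold pvRank
  cases h : (PySem.Dict.mk item).get? "urgency" with
  | none =>
    right; right
    refine ⟨by simp, by simp, ?_⟩
    decide
  | some s =>
    rcases eq_or_ne s "high" with hs | hs
    · subst hs; left; exact ⟨rfl, by decide⟩
    · rcases eq_or_ne s "medium" with hm | hm
      · subst hm; right; left
        exact ⟨by simp [hs], rfl, by decide⟩
      · right; right
        refine ⟨by simp [hs], by simp [hm], ?_⟩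
        rcases eq_or_ne s "low" with hl | hl
        · subst hl; decide
        · simp [pvURGENCY_RANK, PySem.Dict.getD_eq_get?_getD,
            PySem.Dict.get?, Ne.symm hs, Ne.symm hm, Ne.symm hl]

theorem pv_rank_mem (item : List (String × String)) :
    pvRank item = 0 ∨ pvRank item = 1 ∨ pvRank item = 2 := by
  rcases pv_rank_cases item with ⟨_, h⟩ | ⟨_, _, h⟩ | ⟨_, _, h⟩ <;> simp [h]

-- insertBy drops x after every element it does not sort strictly before
theorem pv_insertBy_split {α : Type} (key : α → Int) (x : α) (ys zs : List α)
    (h1 : ∀ y ∈ ys, ¬ key x < key y) (h2 : ∀ z ∈ zs, key x < key z) :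
    PySem.List.insertBy (fun a b => decide (key a < key b)) x (ys ++ zs) = ys ++ x :: zs := by
  induction ys with
  | nil =>
    cases zs with
    | nil => simp [PySem.List.insertBy]
    | cons z zs => simp [PySem.List.insertBy, h2 z (by simp)]
  | cons y ys ih =>
    have hy : ¬ key x < key y := h1 y (by simp)
    simp only [List.cons_append, PySem.List.insertBy, hy, decide_false]
    simp only [Bool.false_eq_true, if_false, List.cons.injEq, true_and]
    exact ih (fun y hy => h1 y (by simp [hy]))

-- the foldl-insertBy invariant behind pv_sorted_three
theorem pv_sorted_three_aux {α : Type} (key : α → Int)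
    (hk : ∀ x : α, key x = 0 ∨ key x = 1 ∨ key x = 2) :
    ∀ (l p : List α),
      l.foldl (fun acc x => PySem.List.insertBy (fun a b => decide (key a < key b)) x acc)
        (p.filter (fun x => key x == 0) ++ p.filter (fun x => key x == 1) ++
          p.filter (fun x => key x == 2)) =
      (p ++ l).filter (fun x => key x == 0) ++ (p ++ l).filter (fun x => key x == 1) ++
        (p ++ l).filter (fun x => key x == 2) := by
  intro l
  induction l with
  | nil => intro p; simp
  | cons x l ih =>
    intro p
    simp only [List.foldl_cons]
    have hstep : PySem.List.insertBy (fun a b => decide (key a < key b)) x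
        (p.filter (fun x => key x == 0) ++ p.filter (fun x => key x == 1) ++
          p.filter (fun x => key x == 2)) =
        (p ++ [x]).filter (fun x => key x == 0) ++ (p ++ [x]).filter (fun x => key x == 1) ++
          (p ++ [x]).filter (fun x => key x == 2) := by
      rcases hk x with h | h | h
      · have h1 : ∀ y ∈ p.filter (fun x => key x == 0), ¬ key x < key y := by
          intro y hy
          simp only [List.mem_filter, beq_iff_eq] at hy
          omega
        have h2 : ∀ z ∈ p.filter (fun x => key x == 1) ++ p.filter (fun x => key x == 2),
            key x < key z := by
          intro z hz
          simp only [List.mem_append, List.mem_filter, beq_iff_eq] at hz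
          rcases hz with hz | hz <;> omega
        rw [List.append_assoc, pv_insertBy_split key x _ _ h1 h2]
        simp [List.filter_append, h, List.append_assoc]
      · have h1 : ∀ y ∈ p.filter (fun x => key x == 0) ++ p.filter (fun x => key x == 1),
            ¬ key x < key y := by
          intro y hy
          simp only [List.mem_append, List.mem_filter, beq_iff_eq] at hy
          rcases hy with hy | hy <;> omega
        have h2 : ∀ z ∈ p.filter (fun x => key x == 2), key x < key z := by
          intro z hz
          simp only [List.mem_filter, beq_iff_eq] at hz
          omega
        rw [pv_insertBy_split key x _ _ h1 h2]
        simp [List.filter_append, h, List.append_assoc]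
      · have h1 : ∀ y ∈ (p.filter (fun x => key x == 0) ++ p.filter (fun x => key x == 1)) ++
            p.filter (fun x => key x == 2), ¬ key x < key y := by
          intro y hy
          simp only [List.mem_append, List.mem_filter, beq_iff_eq] at hy
          rcases hy with (hy | hy) | hy <;> omega
        have h2 : ∀ z ∈ ([] : List α), key x < key z := by intro z hz; simp at hz
        have := pv_insertBy_split key x _ _ h1 h2
        rw [List.append_nil] at this
        rw [this]
        simp [List.filter_append, h, List.append_assoc]
    rw [hstep, ih (p ++ [x])]
    simp [List.append_assoc]

-- a stable sort by a {0,1,2}-valued key is the three filters concatenated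
theorem pv_sorted_three {α : Type} (key : α → Int)
    (hk : ∀ x : α, key x = 0 ∨ key x = 1 ∨ key x = 2) (l : List α) :
    PySem.List.sorted l key false =
      l.filter (fun x => key x == 0) ++ l.filter (fun x => key x == 1) ++
        l.filter (fun x => key x == 2) := by
  rw [PySem.List.sorted_eq_foldl_insertBy]
  simpa using pv_sorted_three_aux key hk l []

-- B's fused pass carries exactly the three rank-filters of A's dedup list
theorem pv_fused_eq (l : List (List (String × String))) (seen : PySem.Set String)
    (u : List (List (String × String))) :
    l.foldl
      (fun (st : PySem.Set String × List (List (String × String)) ×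
                 List (List (String × String)) × List (List (String × String))) item =>
        let display := pvDisplay item
        if PySem.Set.contains st.1 display then st
        else
          let seen := PySem.Set.add st.1 display
          let u := (PySem.Dict.mk item).get? "urgency"
          if u = some "high" then (seen, st.2.1 ++ [item], st.2.2.1, st.2.2.2)
          else if u = some "medium" then (seen, st.2.1, st.2.2.1 ++ [item], st.2.2.2)
          else (seen, st.2.1, st.2.2.1, st.2.2.2 ++ [item]))
      (seen, u.filter (fun x => pvRank x == 0), u.filter (fun x => pvRank x == 1),
        u.filter (fun x => pvRank x == 2)) =
    (let su := l.foldl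
        (fun (su : PySem.Set String × List (List (String × String))) item =>
          let display := pvDisplay item
          if PySem.Set.contains su.1 display then su
          else (PySem.Set.add su.1 display, su.2 ++ [item])) (seen, u)
     (su.1, su.2.filter (fun x => pvRank x == 0), su.2.filter (fun x => pvRank x == 1),
       su.2.filter (fun x => pvRank x == 2))) := by
  induction l generalizing seen u with
  | nil => rfl
  | cons item l ih =>
    simp only [List.foldl_cons]
    by_cases hc : PySem.Set.contains seen (pvDisplay item) = true
    · simp only [hc]
      exact ih seen u
    · simp only [hc]
      rcases pv_rank_cases item with ⟨hu, hr⟩ | ⟨hu1, hu, hr⟩ | ⟨hu1, hu2, hr⟩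
      · simp only [hu, reduceIte]
        have := ih (PySem.Set.add seen (pvDisplay item)) (u ++ [item])
        simpa [List.filter_append, hr] using this
      · simp only [hu, reduceIte]
        have := ih (PySem.Set.add seen (pvDisplay item)) (u ++ [item])
        simpa [List.filter_append, hr] using this
      · simp only [if_neg hu1, if_neg hu2]
        have := ih (PySem.Set.add seen (pvDisplay item)) (u ++ [item])
        simpa [List.filter_append, hr] using this

-- A's and B's per-feed transforms agree on every item list
theorem pv_transform_eq (l : List (List (String × String))) :
    (PySem.List.slice
      (PySem.List.sorted
        (l.foldl
          (fun (su : PySem.Set String × List (List (String × String))) item =>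
            let display := pvDisplay item
            if PySem.Set.contains su.1 display then su
            else (PySem.Set.add su.1 display, su.2 ++ [item]))
          (PySem.Set.empty, [])).2 pvRank false) none (some 8)) =
    (PySem.List.slice
      (let st := l.foldl
          (fun (st : PySem.Set String × List (List (String × String)) ×
                     List (List (String × String)) × List (List (String × String))) item =>
            let display := pvDisplay item
            if PySem.Set.contains st.1 display then st
            else
              let seen := PySem.Set.add st.1 display
              let u := (PySem.Dict.mk item).get? "urgency"
              if u = some "high" then (seen, st.2.1 ++ [item], st.2.2.1, st.2.2.2)
              else if u = some "medium" then (seen, st.2.1, st.2.2.1 ++ [item], st.2.2.2)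
              else (seen, st.2.1, st.2.2.1, st.2.2.2 ++ [item]))
          (PySem.Set.empty, [], [], [])
       st.2.1 ++ st.2.2.1 ++ st.2.2.2) none (some 8)) := by
  have h := pv_fused_eq l PySem.Set.empty []
  simp only [List.filter_nil] at h
  dsimp only
  rw [h]
  rw [pv_sorted_three pvRank pv_rank_mem]

-- one update loop over a dict's own distinct keys equals the other (values read
-- from the evolving dict vs from the snapshot), once the transforms agree
theorem pv_loop_eq (F G : List (List (String × String)) → List (List (String × String)))
    (hFG : ∀ l, F l = G l) :
    ∀ (ps : List (String × List (List (String × String))))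
      (d : PySem.Dict String (List (List (String × String)))),
      (∀ p ∈ ps, d.get? p.1 = some p.2) → (ps.map Prod.fst).Nodup →
      ps.foldl (fun d' p => d'.insert p.1 (F (d'.getD p.1 []))) d =
        ps.foldl (fun d' p => d'.insert p.1 (G p.2)) d := by
  intro ps
  induction ps with
  | nil => intro d _ _; rfl
  | cons p ps ih =>
    intro d hget hnd
    simp only [List.foldl_cons]
    have hv : d.getD p.1 [] = p.2 :=
      PySem.Dict.getD_of_get?_eq_some d [] (hget p (by simp))
    rw [hv, hFG p.2]
    apply ih
    · intro q hq
      have hne : q.1 ≠ p.1 := by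
        simp only [List.map_cons, List.nodup_cons] at hnd
        intro he
        exact hnd.1 (he ▸ List.mem_map_of_mem hq)
      rw [PySem.Dict.get?_insert_of_ne (d := d) (v := G p.2) hne]
      exact hget q (by simp [hq])
    · simpa using hnd.of_cons

-- the merge loop never changes the key set
theorem pv_keys_merge (rf : List (String × List (List (String × String))))
    (d : PySem.Dict String (List (List (String × String)))) :
    (rf.foldl (fun d kv =>
        let base := pvBase kv.1
        if d.contains base then d.modify base [] (fun l => l ++ kv.2) else d) d).keys =
      d.keys := by
  induction rf generalizing d with
  | nil => rfl
  | cons kv rf ih =>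
    simp only [List.foldl_cons]
    split
    · next hc =>
      rw [ih, PySem.Dict.keys_modify, PySem.Dict.keys_insert_of_contains _ _ hc]
    · exact ih d

-- ===== VERDICT (by name: the statement is the Claim_ definition above) =====
-- the per-key update loop of A equals the per-item update loop of B on any
-- dict with distinct keys (the transforms agree by pv_transform_eq)
theorem pv_main (M : PySem.Dict String (List (List (String × String))))
    (hnd : M.keys.Nodup) :
    (M.keys.foldl (fun d base =>
      let su :=
        (d.getD base []).foldl
          (fun (su : PySem.Set String × List (List (String × String))) item =>
            let display := pvDisplay item
            if PySem.Set.contains su.1 display then su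
            else (PySem.Set.add su.1 display, su.2 ++ [item]))
          (PySem.Set.empty, [])
      let unique := PySem.List.sorted su.2 pvRank false
      d.insert base (PySem.List.slice unique none (some 8))) M).items =
    (M.items.foldl (fun d bi =>
      let st :=
        bi.2.foldl
          (fun (st : PySem.Set String × List (List (String × String)) ×
                     List (List (String × String)) × List (List (String × String))) item =>
            let display := pvDisplay item
            if PySem.Set.contains st.1 display then st
            else
              let seen := PySem.Set.add st.1 display
              let u := (PySem.Dict.mk item).get? "urgency"
              if u = some "high" then (seen, st.2.1 ++ [item], st.2.2.1, st.2.2.2)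
              else if u = some "medium" then (seen, st.2.1, st.2.2.1 ++ [item], st.2.2.2)
              else (seen, st.2.1, st.2.2.1, st.2.2.2 ++ [item]))
          (PySem.Set.empty, [], [], [])
      d.insert bi.1 (PySem.List.slice (st.2.1 ++ st.2.2.1 ++ st.2.2.2) none (some 8))) M).items := by
  rw [show M.keys = M.items.map Prod.fst from rfl, List.foldl_map]
  exact congrArg PySem.Dict.items
    (pv_loop_eq _ _ pv_transform_eq M.items M
      (fun p hp => PySem.Dict.get?_of_mem_items M hp hnd) hnd)

theorem merge_feeds_spec : Claim_equal_merge_feeds := by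
  unfold Claim_equal_merge_feeds
  intro rf _ _
  unfold Spec_merge_feeds merge_feeds merge_feeds_alt
  dsimp only
  apply pv_main
  rw [pv_keys_merge]
  decide
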